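-- pv_equiv track=rewrite | github.com/RCBSi/advent-of-code-2019 | day04_monotonic.py | epitct
-- ===== SOURCE A (Python) =====
-- def epitct(y): # Not every pair is in a triple.s
--     mult = [1]
--     for x in y[1:]:
--         if x == 0:
--             mult[-1] += 1
--         if x != 0:
--             mult += [1]
--     return mult
-- ===== SOURCE B (Python) =====
-- def epitct(y):
--     markers = [True] + [x != 0 for x in y[1:]]
--     starts = [i for i, m in enumerate(markers) if m]
--     bounds = starts + [len(markers)]
--     return [b - a for a, b in zip(bounds, bounds[1:])]
-- ===== Notes on version B (the rewrite author's own statement) =====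
-- stated objective: alternative
-- what changed: Replaces A's single accumulate-into-last-element loop with a boundary-table method: build a marker list of group starts (seeded with True so the empty list naturally yields [1]), collect the start indices, append the length as a sentinel, and return consecutive differences.
import Mathlib
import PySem

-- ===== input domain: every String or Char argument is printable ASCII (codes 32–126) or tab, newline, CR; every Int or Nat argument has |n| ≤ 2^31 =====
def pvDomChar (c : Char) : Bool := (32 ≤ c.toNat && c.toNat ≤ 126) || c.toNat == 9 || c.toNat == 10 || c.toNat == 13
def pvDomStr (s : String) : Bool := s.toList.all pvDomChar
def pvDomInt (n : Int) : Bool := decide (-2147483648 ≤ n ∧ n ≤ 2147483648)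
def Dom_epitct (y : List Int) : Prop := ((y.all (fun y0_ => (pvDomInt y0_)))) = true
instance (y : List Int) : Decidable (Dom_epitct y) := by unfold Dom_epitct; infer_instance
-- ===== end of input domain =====

-- B replaces A's accumulate-into-last-element loop with a boundary table (group-start
-- indices plus a length sentinel, then consecutive differences); same cost, different shape.

-- ===== PORT A =====
-- loop body: two sequential ifs, mutating mult[-1] or appending [1]
def epitctStep (mult : List Int) (x : Int) : List Int :=
  -- mult[-1] += 1 : mult is always nonempty here, ported by hand as dropLast ++ [last+1] (exact)
  let mult := if x == 0 then mult.dropLast ++ [mult.getLast! + 1] else mult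
  if x != 0 then mult ++ [1] else mult

def epitct (y : List Int) : List Int :=
  (PySem.List.slice y (some 1) none).foldl epitctStep [1]

-- ===== PORT B =====
def epitct_alt (y : List Int) : List Int :=
  let markers : List Bool := [true] ++ (PySem.List.slice y (some 1) none).map (fun x => x != 0)
  let starts : List Int :=
    (PySem.List.enumerate markers 0).filterMap (fun p => if p.2 then some p.1 else none)
  let bounds : List Int := starts ++ [(markers.length : Int)]
  ((bounds.zip (PySem.List.slice bounds (some 1) none)).map (fun p => p.2 - p.1))

-- ===== PRECONDITION & SPEC =====
def Spec_epitct (y : List Int) (out : List Int) : Prop := out = epitct_alt y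
instance (y : List Int) (out : List Int) : Decidable (Spec_epitct y out) := by unfold Spec_epitct; infer_instance

-- ===== CLAIM (what is proved, stated in full; the proofs are below) =====
def Claim_equal_epitct : Prop := ∀ (y : List Int), Dom_epitct y → Spec_epitct y (epitct y)

-- ===== LEMMAS AND PROOFS =====

-- run-length groups of a marker list, with carried count c
def pvG (c : Int) : List Bool → List Int
  | [] => [c]
  | true :: ms => c :: pvG 1 ms
  | false :: ms => pvG (c+1) ms

def pvStartsFrom (i : Int) : List Bool → List Int
  | [] => []
  | true :: ms => i :: pvStartsFrom (i+1) ms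
  | false :: ms => pvStartsFrom (i+1) ms

def pvDiffs (l : List Int) : List Int :=
  (l.zip (l.drop 1)).map (fun p => p.2 - p.1)

theorem foldA_eq_pvG (t : List Int) : ∀ (m : List Int) (c : Int),
    t.foldl epitctStep (m ++ [c]) = m ++ pvG c (t.map (fun x => x != 0)) := by
  induction t with
  | nil => intro m c; simp [pvG]
  | cons x t ih =>
    intro m c
    by_cases hx : x = 0
    · simp [epitctStep, hx, pvG, ih m (c+1)]
    · have : epitctStep (m ++ [c]) x = (m ++ [c]) ++ [1] := by
        simp [epitctStep, hx]
      simp only [List.foldl_cons, this, List.append_assoc]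
      rw [← List.append_assoc]
      rw [ih (m ++ [c]) 1]
      have hxt : (x != 0) = true := by simp [hx]
      simp [pvG, hxt]

theorem filterMap_enumerate_eq_startsFrom (ms : List Bool) : ∀ (s : Int),
    (PySem.List.enumerate ms s).filterMap (fun p => if p.2 then some p.1 else none)
      = pvStartsFrom s ms := by
  induction ms with
  | nil => intro s; simp [PySem.List.enumerate_nil, pvStartsFrom]
  | cons b ms ih =>
    intro s
    rw [PySem.List.enumerate_cons]
    cases b <;> simp [pvStartsFrom, ih (s+1)]

theorem pvDiffs_cons_cons (a b : Int) (l : List Int) :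
    pvDiffs (a :: b :: l) = (b - a) :: pvDiffs (b :: l) := by
  simp [pvDiffs]

theorem pvDiffs_startsFrom (ms : List Bool) : ∀ (p c : Int),
    pvDiffs (p :: (pvStartsFrom (p + c) ms ++ [p + c + ms.length])) = pvG c ms := by
  induction ms with
  | nil =>
    intro p c
    simp only [pvStartsFrom, List.nil_append, pvDiffs, pvG, List.length_nil]
    simp
  | cons b ms ih =>
    intro p c
    cases b
    · simp only [pvStartsFrom, List.length_cons]
      push_cast
      rw [show p + c + ((ms.length : Int) + 1) = p + (c + 1) + ms.length by ring,
          show p + c + 1 = p + (c + 1) by ring, ih p (c+1)]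
      simp [pvG]
    · simp only [pvStartsFrom, List.length_cons, List.cons_append]
      rw [pvDiffs_cons_cons]
      push_cast
      rw [show p + c + ((ms.length : Int) + 1) = (p + c) + 1 + ms.length by ring]
      rw [ih (p + c) 1]
      simp [pvG]

-- ===== VERDICT (by name: the statement is the Claim_ definition above) =====
theorem epitct_spec : Claim_equal_epitct := by
  intro y _
  unfold Spec_epitct epitct epitct_alt
  set t := PySem.List.slice y (some 1) none with ht
  have hA : t.foldl epitctStep ([] ++ [1]) = [] ++ pvG 1 (t.map (fun x => x != 0)) :=
    foldA_eq_pvG t [] 1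
  simp only [List.nil_append] at hA
  rw [hA]
  set ms : List Bool := t.map (fun x => x != 0) with hms
  dsimp only []
  simp only [List.singleton_append]
  rw [filterMap_enumerate_eq_startsFrom (true :: ms) 0]
  have hslice : ∀ (l : List Int), PySem.List.slice l (some 1) none = l.drop 1 := by
    intro l
    simpa using PySem.List.slice_from_natCast (a := 1) (xs := l)
  rw [hslice]
  have hdiff := pvDiffs_startsFrom ms 0 1
  have hb : ((pvStartsFrom 0 (true :: ms)) ++ [(((true :: ms).length : Nat) : Int)])
      = 0 :: (pvStartsFrom (0 + 1) ms ++ [0 + 1 + (ms.length : Int)]) := by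
    simp [pvStartsFrom]
    ring
  rw [hb]
  unfold pvDiffs at hdiff
  simpa using hdiff.symm
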